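-- pv_equiv track=rewrite | github.com/drjyeh/mqttcli | app.py | getvalleys1
-- ===== SOURCE A (Python) =====
-- def getvalleys1(data, threshold, width):
--   valleys = []
--   numval = width
--
--   for i in range(len(data)):
--     if (data[i] < threshold):
--       if (numval > 0):
--         numval -= 1
--         if (numval <=0):
--           valleys.append(i)
--     else:
--       numval = width
--   return valleys
-- ===== SOURCE B (Python) =====
-- from itertools import groupby
--
-- def getvalleys1(data, threshold, width):
--     valleys = []
--     offset = 0
--     for below, grp in groupby(data, key=lambda x: x < threshold):
--         run_len = sum(1 for _ in grp)
--         if below and width > 0 and run_len >= width: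
--             valleys.append(offset + width - 1)
--         offset += run_len
--     return valleys
-- ===== Notes on version B (the rewrite author's own statement) =====
-- stated objective: alternative
-- what changed: Replaces A's per-element countdown state machine with a groupby partition into maximal below/above-threshold runs, emitting start+width-1 for each below run of length >= width via index arithmetic.
import Mathlib
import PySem

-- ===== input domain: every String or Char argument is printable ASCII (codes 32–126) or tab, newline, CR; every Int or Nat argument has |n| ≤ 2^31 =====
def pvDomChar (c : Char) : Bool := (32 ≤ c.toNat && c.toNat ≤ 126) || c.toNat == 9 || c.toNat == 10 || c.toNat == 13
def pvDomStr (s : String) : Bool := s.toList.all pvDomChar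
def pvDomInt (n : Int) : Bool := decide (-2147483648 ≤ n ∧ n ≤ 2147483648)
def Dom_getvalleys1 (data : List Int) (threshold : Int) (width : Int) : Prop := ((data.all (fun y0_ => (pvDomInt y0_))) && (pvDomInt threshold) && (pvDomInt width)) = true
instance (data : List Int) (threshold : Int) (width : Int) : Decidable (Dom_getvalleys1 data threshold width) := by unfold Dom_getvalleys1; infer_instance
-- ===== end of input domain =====

-- B replaces A's per-element countdown with a partition into maximal runs and index arithmetic (objective: alternative decomposition).

-- ===== PORT A =====
-- A's loop over range(len(data)): structural recursion carrying the index i and the countdown numval.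
def pvALoop (threshold width : Int) : List Int → Int → Int → List Int → List Int
  | [], _, _, valleys => valleys
  | x :: rest, i, numval, valleys =>
    if x < threshold then
      if numval > 0 then
        let numval' := numval - 1
        if numval' ≤ 0 then pvALoop threshold width rest (i + 1) numval' (valleys ++ [i])
        else pvALoop threshold width rest (i + 1) numval' valleys
      else pvALoop threshold width rest (i + 1) numval valleys
    else pvALoop threshold width rest (i + 1) width valleys

def getvalleys1 (data : List Int) (threshold : Int) (width : Int) : List Int :=
  pvALoop threshold width data 0 width []

-- ===== PORT B =====
-- B: split off each maximal run with the same key (x < threshold); for a below-threshold run of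
-- length ≥ width (width > 0) emit offset + width - 1; advance the offset by the run length.
def pvBLoop (threshold width : Int) (xs : List Int) (off : Int) : List Int :=
  match xs with
  | [] => []
  | x :: t =>
    let p := fun y => (decide (y < threshold)) == (decide (x < threshold))
    let run := (x :: t).takeWhile p
    let rest := (x :: t).dropWhile p
    if x < threshold ∧ 0 < width ∧ width ≤ (run.length : Int) then
      (off + width - 1) :: pvBLoop threshold width rest (off + run.length)
    else pvBLoop threshold width rest (off + run.length)
termination_by xs.length
decreasing_by
  all_goals
    simp only [List.dropWhile_cons, beq_self_eq_true, if_pos, List.length_cons]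
    exact Nat.lt_succ_of_le (List.length_dropWhile_le _ _)

def getvalleys1_alt (data : List Int) (threshold : Int) (width : Int) : List Int :=
  pvBLoop threshold width data 0

-- ===== PRECONDITION & SPEC =====
def Spec_getvalleys1 (data : List Int) (threshold : Int) (width : Int) (out : List Int) : Prop := out = getvalleys1_alt data threshold width
instance (data : List Int) (threshold : Int) (width : Int) (out : List Int) : Decidable (Spec_getvalleys1 data threshold width out) := by unfold Spec_getvalleys1; infer_instance

-- ===== CLAIM (what is proved, stated in full; the proofs are below) =====
def Claim_equal_getvalleys1 : Prop := ∀ (data : List Int) (threshold : Int) (width : Int), Dom_getvalleys1 data threshold width → Spec_getvalleys1 data threshold width (getvalleys1 data threshold width)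

-- ===== LEMMAS AND PROOFS =====

theorem pvALoop_congr (threshold width : Int) (xs : List Int) {i i' n n' : Int}
    {acc acc' : List Int} (hi : i = i') (hn : n = n') (ha : acc = acc') :
    pvALoop threshold width xs i n acc = pvALoop threshold width xs i' n' acc' := by
  subst hi; subst hn; subst ha; rfl

-- Over a below-threshold run with non-positive countdown, A appends nothing and keeps its state.
theorem pvALoop_below_nonpos (threshold width : Int) (ys : List Int)
    (hys : ∀ y ∈ ys, y < threshold) (rest : List Int) (i n : Int) (acc : List Int)
    (hn : n ≤ 0) :
    pvALoop threshold width (ys ++ rest) i n acc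
      = pvALoop threshold width rest (i + ys.length) n acc := by
  induction ys generalizing i acc with
  | nil => simp
  | cons y ys ih =>
    have hy : y < threshold := hys y (by simp)
    simp only [List.cons_append, pvALoop, if_pos hy, if_neg (by omega : ¬ n > 0)]
    rw [ih (fun z hz => hys z (by simp [hz]))]
    exact pvALoop_congr _ _ _ (by simp only [List.length_cons]; push_cast; ring) rfl rfl

-- Over a below-threshold run with positive countdown n, A appends i + n - 1 iff the run is
-- long enough, and ends the run with countdown 0 (resp. n - length).
theorem pvALoop_below_pos (threshold width : Int) (ys : List Int)
    (hys : ∀ y ∈ ys, y < threshold) (rest : List Int) (i n : Int) (acc : List Int)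
    (hn : 0 < n) :
    pvALoop threshold width (ys ++ rest) i n acc
      = if n ≤ (ys.length : Int) then
          pvALoop threshold width rest (i + ys.length) 0 (acc ++ [i + n - 1])
        else
          pvALoop threshold width rest (i + ys.length) (n - ys.length) acc := by
  induction ys generalizing i n acc with
  | nil => simp [show ¬ n ≤ (0:Int) by omega]
  | cons y ys ih =>
    have hy : y < threshold := hys y (by simp)
    have hys' : ∀ y ∈ ys, y < threshold := fun z hz => hys z (by simp [hz])
    simp only [List.cons_append, pvALoop, if_pos hy, if_pos (by omega : n > 0)]
    by_cases h1 : n - 1 ≤ 0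
    · -- n = 1: append here, then the rest of the run with countdown 0
      rw [if_pos h1, pvALoop_below_nonpos threshold width ys hys' rest (i+1) (n-1) _ h1,
          if_pos (by simp only [List.length_cons]; push_cast; omega)]
      refine pvALoop_congr _ _ _ (by simp only [List.length_cons]; push_cast; ring) (by omega) ?_
      have hn1 : n = 1 := by omega
      subst hn1; norm_num
    · rw [if_neg h1, ih hys' (i+1) (n-1) acc (by omega)]
      by_cases h2 : n ≤ (ys.length : Int) + 1
      · rw [if_pos (by omega), if_pos (by simp only [List.length_cons]; push_cast; omega)]
        refine pvALoop_congr _ _ _ (by simp only [List.length_cons]; push_cast; ring) rfl ?_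
        have he : i + 1 + (n - 1) - 1 = i + n - 1 := by ring
        rw [he]
      · rw [if_neg (by omega), if_neg (by simp only [List.length_cons]; push_cast; omega)]
        exact pvALoop_congr _ _ _ (by simp only [List.length_cons]; push_cast; ring)
          (by simp only [List.length_cons]; push_cast; ring) rfl

-- Over a nonempty above-threshold run A appends nothing and resets the countdown to width.
theorem pvALoop_above (threshold width : Int) (ys : List Int) (hne : ys ≠ [])
    (hys : ∀ y ∈ ys, ¬ y < threshold) (rest : List Int) (i n : Int) (acc : List Int) :
    pvALoop threshold width (ys ++ rest) i n acc
      = pvALoop threshold width rest (i + ys.length) width acc := by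
  induction ys generalizing i n acc with
  | nil => exact absurd rfl hne
  | cons y ys ih =>
    have hy : ¬ y < threshold := hys y (by simp)
    simp only [List.cons_append, pvALoop, if_neg hy]
    rcases ys with _ | ⟨z, zs⟩
    · exact pvALoop_congr _ _ _ (by simp) rfl rfl
    · rw [ih (by simp) (fun w hw => hys w (by simp [hw]))]
      exact pvALoop_congr _ _ _ (by simp only [List.length_cons]; push_cast; ring) rfl rfl

theorem pvDropWhile_head_false {α : Type} (p : α → Bool) (l : List α) (x : α)
    (hx : x ∈ (l.dropWhile p).head?) : p x = false := by
  induction l with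
  | nil => simp [List.dropWhile] at hx
  | cons y ys ih =>
    rw [List.dropWhile_cons] at hx
    by_cases hy : p y = true
    · rw [if_pos hy] at hx; exact ih hx
    · rw [if_neg hy] at hx
      simp at hx
      subst hx
      simpa using hy

-- Main invariant: whenever A is at a fresh run boundary (countdown = width, or the next element
-- is not below threshold), A's loop equals acc ++ B's run loop.
theorem pvMain (threshold width : Int) :
    ∀ (m : Nat) (xs : List Int), xs.length ≤ m → ∀ (i n : Int) (acc : List Int),
      (∀ x t, xs = x :: t → x < threshold → n = width) →
      pvALoop threshold width xs i n acc = acc ++ pvBLoop threshold width xs i := by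
  intro m
  induction m with
  | zero =>
    intro xs hlen i n acc _
    have : xs = [] := List.eq_nil_of_length_eq_zero (Nat.le_zero.mp hlen)
    subst this
    simp [pvALoop, pvBLoop]
  | succ m ih =>
    intro xs hlen i n acc hfresh
    rcases xs with _ | ⟨x, t⟩
    · simp [pvALoop, pvBLoop]
    · set p := fun y => (decide (y < threshold)) == (decide (x < threshold)) with hp
      have hpx : p x = true := by simp [hp]
      have hsplit : (x :: t).takeWhile p ++ (x :: t).dropWhile p = x :: t :=
        List.takeWhile_append_dropWhile
      have hrun_ne : (x :: t).takeWhile p ≠ [] := by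
        rw [List.takeWhile_cons, if_pos hpx]; simp
      have hrun_mem : ∀ y ∈ (x :: t).takeWhile p, p y = true :=
        fun y hy => List.mem_takeWhile_imp hy
      have hrest_len : ((x :: t).dropWhile p).length ≤ m := by
        have h1 : ((x :: t).dropWhile p).length < (x :: t).length := by
          rw [List.dropWhile_cons, if_pos hpx]
          exact Nat.lt_succ_of_le (List.length_dropWhile_le _ _)
        simp only [List.length_cons] at h1 hlen
        omega
      have hrest_fresh : ∀ z u, (x :: t).dropWhile p = z :: u → p z = false := by
        intro z u hz
        exact pvDropWhile_head_false p (x :: t) z (by rw [hz]; rfl)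
      have hbody : pvBLoop threshold width (x :: t) i =
          if x < threshold ∧ 0 < width ∧ width ≤ (((x :: t).takeWhile p).length : Int) then
            (i + width - 1) :: pvBLoop threshold width ((x :: t).dropWhile p)
              (i + ((x :: t).takeWhile p).length)
          else pvBLoop threshold width ((x :: t).dropWhile p)
              (i + ((x :: t).takeWhile p).length) := by
        rw [pvBLoop.eq_def]
      by_cases hbelow : x < threshold
      · -- below-threshold run; countdown is fresh: n = width
        have hnw : n = width := hfresh x t rfl hbelow
        have hrun_below : ∀ y ∈ (x :: t).takeWhile p, y < threshold := by
          intro y hy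
          have := hrun_mem y hy
          simp [hp, hbelow] at this
          exact this
        have hrest_above : ∀ z u, (x :: t).dropWhile p = z :: u → ¬ z < threshold := by
          intro z u hz
          have := hrest_fresh z u hz
          simp [hp, hbelow] at this
          omega
        by_cases hw : 0 < width
        · conv_lhs => rw [← hsplit]
          rw [pvALoop_below_pos threshold width _ hrun_below _ i n acc (hnw ▸ hw)]
          by_cases hlong : n ≤ (((x :: t).takeWhile p).length : Int)
          · rw [if_pos hlong,
                ih _ hrest_len _ 0 (acc ++ [i + n - 1])
                  (fun z u hz hzb => absurd hzb (hrest_above z u hz))]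
            rw [hbody, if_pos ⟨hbelow, hw, hnw ▸ hlong⟩, hnw]
            simp
          · rw [if_neg hlong,
                ih _ hrest_len _ (n - ((x :: t).takeWhile p).length) acc
                  (fun z u hz hzb => absurd hzb (hrest_above z u hz))]
            rw [hbody, if_neg (by rw [← hnw]; tauto)]
        · conv_lhs => rw [← hsplit]
          rw [pvALoop_below_nonpos threshold width _ hrun_below _ i n acc (by omega),
              ih _ hrest_len _ n acc
                (fun z u hz hzb => absurd hzb (hrest_above z u hz))]
          rw [hbody, if_neg (by tauto)]
      · -- above-threshold run: no appends, countdown reset to width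
        have hrun_above : ∀ y ∈ (x :: t).takeWhile p, ¬ y < threshold := by
          intro y hy
          have := hrun_mem y hy
          simp [hp, hbelow] at this
          simp [this]
        conv_lhs => rw [← hsplit]
        rw [pvALoop_above threshold width _ hrun_ne hrun_above _ i n acc,
            ih _ hrest_len _ width acc (fun _ _ _ _ => rfl)]
        rw [hbody, if_neg (by tauto)]

-- ===== VERDICT (by name: the statement is the Claim_ definition above) =====
theorem getvalleys1_spec : Claim_equal_getvalleys1 := by
  intro data threshold width _
  unfold Spec_getvalleys1 getvalleys1 getvalleys1_alt
  simpa using pvMain threshold width data.length data le_rfl 0 width []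
    (fun _ _ _ _ => rfl)
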